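-- pv_equiv track=rewrite | github.com/TomPyonsuke/NF-Classifier | flows/flows.py | _get_noise_condn_nn_in_dims
-- ===== SOURCE A (Python) =====
-- def _get_noise_condn_nn_in_dims(n_blocks, input_dim, growth_rate):
--     if growth_rate == 0:
--         return n_blocks * [0]
--     in_dims = [0, input_dim]
--     cur_dim, dim_sum = input_dim, input_dim
--     for i in range(n_blocks - 2):
--         dim_sum += cur_dim
--         in_dims.append(dim_sum)
--         cur_dim += growth_rate
--     return in_dims[:n_blocks]
-- ===== SOURCE B (Python) =====
-- def _get_noise_condn_nn_in_dims(n_blocks, input_dim, growth_rate):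
--     if growth_rate == 0:
--         return n_blocks * [0]
--     return [_term(input_dim, growth_rate, i) for i in range(n_blocks)]
--
--
-- def _term(input_dim, growth_rate, i):
--     # closed form: block i is conditioned on i*input_dim plus the accumulated
--     # growth 0+1+...+(i-2) = (i-2)*(i-1)//2 copies of growth_rate
--     if i == 0:
--         return 0
--     return i * input_dim + (i - 2) * (i - 1) // 2 * growth_rate
-- ===== Notes on version B (the rewrite author's own statement) =====
-- stated objective: simpler
-- what changed: Replaces the running dim_sum/cur_dim accumulation loop with an independent closed-form term per index: element i is i*input_dim + (i-2)*(i-1)//2*growth_rate (0 for i=0), built by a single comprehension over range(n_blocks) with no slice.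
-- intended difference: For n_blocks = -1 with growth_rate != 0, A's in_dims[:-1] slice wraps around and returns [0]; B returns [], the intended value for a non-positive block count and the one A itself returns on the growth_rate == 0 branch. — e.g. on _get_noise_condn_nn_in_dims(-1, 5, 1): A returns [0], B returns []
import Mathlib
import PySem

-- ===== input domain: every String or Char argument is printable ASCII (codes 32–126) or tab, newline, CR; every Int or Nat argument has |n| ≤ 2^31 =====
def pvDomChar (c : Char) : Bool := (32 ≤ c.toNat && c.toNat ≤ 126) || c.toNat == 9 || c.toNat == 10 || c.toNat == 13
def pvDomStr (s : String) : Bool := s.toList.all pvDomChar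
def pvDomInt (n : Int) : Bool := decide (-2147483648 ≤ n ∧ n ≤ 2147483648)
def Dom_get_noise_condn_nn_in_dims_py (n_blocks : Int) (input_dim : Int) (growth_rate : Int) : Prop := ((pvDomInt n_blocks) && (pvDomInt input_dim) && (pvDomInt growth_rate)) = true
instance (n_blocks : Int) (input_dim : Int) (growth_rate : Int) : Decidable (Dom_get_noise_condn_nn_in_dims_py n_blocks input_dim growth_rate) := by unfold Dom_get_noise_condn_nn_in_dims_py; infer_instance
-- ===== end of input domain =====

-- B computes each conditioning dimension by an independent closed-form term instead of A's running accumulation (objective: simpler).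


-- ===== PORT A =====
-- loop body of A: state is (in_dims, cur_dim, dim_sum)
def pvStepA (growth_rate : Int) (st : List Int × Int × Int) (_i : Int) : List Int × Int × Int :=
  let dim_sum := st.2.2 + st.2.1
  (st.1 ++ [dim_sum], st.2.1 + growth_rate, dim_sum)

def get_noise_condn_nn_in_dims_py (n_blocks : Int) (input_dim : Int) (growth_rate : Int) : List Int :=
  if growth_rate = 0 then List.replicate n_blocks.toNat 0
  else
    let st := (PySem.List.pyRange 0 (n_blocks - 2) 1).foldl (pvStepA growth_rate)
                ([0, input_dim], input_dim, input_dim)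
    PySem.List.slice st.1 none (some n_blocks)

-- ===== PORT B =====
-- closed-form term of Source B's _term helper
def pvTerm (input_dim : Int) (growth_rate : Int) (i : Int) : Int :=
  if i = 0 then 0
  else i * input_dim + PySem.Int.floordiv ((i - 2) * (i - 1)) 2 * growth_rate

def get_noise_condn_nn_in_dims_py_alt (n_blocks : Int) (input_dim : Int) (growth_rate : Int) : List Int :=
  if growth_rate = 0 then List.replicate n_blocks.toNat 0
  else (PySem.List.pyRange 0 n_blocks 1).map (pvTerm input_dim growth_rate)

-- ===== PRECONDITION & SPEC =====
-- For n_blocks = -1 with growth_rate ≠ 0, A's in_dims[:-1] slice wraps around and returns [0];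
-- B returns [], the intended value for a non-positive block count (and what A itself returns
-- on the growth_rate == 0 branch for any negative n_blocks).
def D_get_noise_condn_nn_in_dims_py (n_blocks : Int) (input_dim : Int) (growth_rate : Int) : Prop :=
  n_blocks = -1 ∧ growth_rate ≠ 0
instance (n_blocks : Int) (input_dim : Int) (growth_rate : Int) : Decidable (D_get_noise_condn_nn_in_dims_py n_blocks input_dim growth_rate) := by unfold D_get_noise_condn_nn_in_dims_py; infer_instance

def Spec_get_noise_condn_nn_in_dims_py (n_blocks : Int) (input_dim : Int) (growth_rate : Int) (out : List Int) : Prop := ¬ D_get_noise_condn_nn_in_dims_py n_blocks input_dim growth_rate → out = get_noise_condn_nn_in_dims_py_alt n_blocks input_dim growth_rate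
instance (n_blocks : Int) (input_dim : Int) (growth_rate : Int) (out : List Int) : Decidable (Spec_get_noise_condn_nn_in_dims_py n_blocks input_dim growth_rate out) := by unfold Spec_get_noise_condn_nn_in_dims_py; infer_instance

def pvDiffWitness_get_noise_condn_nn_in_dims_py : Int × Int × Int := (-1, 5, 1)
def pvDiffWitnessOut_get_noise_condn_nn_in_dims_py : (List Int) × (List Int) := ([0], [])

-- ===== CLAIM (what is proved, stated in full; the proofs are below) =====
def Claim_unchanged_get_noise_condn_nn_in_dims_py : Prop := ∀ (n_blocks : Int) (input_dim : Int) (growth_rate : Int), Dom_get_noise_condn_nn_in_dims_py n_blocks input_dim growth_rate → Spec_get_noise_condn_nn_in_dims_py n_blocks input_dim growth_rate (get_noise_condn_nn_in_dims_py n_blocks input_dim growth_rate)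
def Claim_changed_get_noise_condn_nn_in_dims_py : Prop := Dom_get_noise_condn_nn_in_dims_py (pvDiffWitness_get_noise_condn_nn_in_dims_py.1) (pvDiffWitness_get_noise_condn_nn_in_dims_py.2.1) (pvDiffWitness_get_noise_condn_nn_in_dims_py.2.2) ∧ D_get_noise_condn_nn_in_dims_py (pvDiffWitness_get_noise_condn_nn_in_dims_py.1) (pvDiffWitness_get_noise_condn_nn_in_dims_py.2.1) (pvDiffWitness_get_noise_condn_nn_in_dims_py.2.2) ∧ get_noise_condn_nn_in_dims_py (pvDiffWitness_get_noise_condn_nn_in_dims_py.1) (pvDiffWitness_get_noise_condn_nn_in_dims_py.2.1) (pvDiffWitness_get_noise_condn_nn_in_dims_py.2.2) = pvDiffWitnessOut_get_noise_condn_nn_in_dims_py.1 ∧ get_noise_condn_nn_in_dims_py_alt (pvDiffWitness_get_noise_condn_nn_in_dims_py.1) (pvDiffWitness_get_noise_condn_nn_in_dims_py.2.1) (pvDiffWitness_get_noise_condn_nn_in_dims_py.2.2) = pvDiffWitnessOut_get_noise_condn_nn_in_dims_py.2 ∧ pvDiffWitnessOut_get_noise_condn_nn_in_dims_py.1 ≠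 pvDiffWitnessOut_get_noise_condn_nn_in_dims_py.2
def Claim_exact_get_noise_condn_nn_in_dims_py : Prop := ∀ (n_blocks : Int) (input_dim : Int) (growth_rate : Int), Dom_get_noise_condn_nn_in_dims_py n_blocks input_dim growth_rate → D_get_noise_condn_nn_in_dims_py n_blocks input_dim growth_rate → get_noise_condn_nn_in_dims_py n_blocks input_dim growth_rate ≠ get_noise_condn_nn_in_dims_py_alt n_blocks input_dim growth_rate

-- ===== LEMMAS AND PROOFS =====

-- triangular step: (a*(a+1))//2 = ((a-1)*a)//2 + a
lemma pvTri (a : Int) : PySem.Int.floordiv (a * (a + 1)) 2 = PySem.Int.floordiv ((a - 1) * a) 2 + a := by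
  rw [PySem.Int.floordiv_eq_ediv_of_pos (by norm_num), PySem.Int.floordiv_eq_ediv_of_pos (by norm_num)]
  obtain ⟨t, ht⟩ := Int.even_mul_succ_self a
  have h1 : a * (a + 1) = a * a + a := by ring
  have h2 : (a - 1) * a = a * a - a := by ring
  rw [h1, h2]
  have ht' : a * a + a = t + t := by rw [← h1, ht]
  omega

-- consecutive closed-form terms differ by cur_dim = input_dim + n*g
lemma pvTerm_succ (input_dim g : Int) (n : Nat) :
    pvTerm input_dim g ((n : Int) + 2) = pvTerm input_dim g ((n : Int) + 1) + (input_dim + (n : Int) * g) := by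
  have h0 : ((n : Int) + 2) ≠ 0 := by omega
  have h1 : ((n : Int) + 1) ≠ 0 := by omega
  simp only [pvTerm, if_neg h0, if_neg h1]
  have e1 : ((n : Int) + 2 - 2) * ((n : Int) + 2 - 1) = (n : Int) * ((n : Int) + 1) := by ring
  have e2 : ((n : Int) + 1 - 2) * ((n : Int) + 1 - 1) = ((n : Int) - 1) * (n : Int) := by ring
  rw [e1, e2, pvTri]
  ring

-- invariant of A's fold: after k steps the state is the closed-form prefix, cur_dim, last term
lemma pvLoopA (input_dim g : Int) (l : List Int) :
    l.foldl (pvStepA g) ([0, input_dim], input_dim, input_dim)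
      = ((List.range (l.length + 2)).map (fun k : Nat => pvTerm input_dim g (k : Int)),
         input_dim + (l.length : Int) * g,
         pvTerm input_dim g ((l.length : Int) + 1)) := by
  induction l using List.reverseRecOn with
  | nil =>
      simp [pvTerm, List.range_succ]
  | append_singleton l x ih =>
      rw [List.foldl_append, ih]
      simp only [List.foldl_cons, List.foldl_nil, pvStepA, List.length_append,
                 List.length_singleton, Prod.mk.injEq]
      refine ⟨?_, ?_, ?_⟩
      · have hr : List.range (l.length + 1 + 2) = List.range (l.length + 2) ++ [l.length + 2] := by
          rw [show l.length + 1 + 2 = (l.length + 2) + 1 by omega, List.range_succ]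
        rw [hr, List.map_append, List.map_cons, List.map_nil]
        congr 2
        push_cast
        rw [pvTerm_succ]
      · push_cast; ring
      · push_cast
        rw [show ((l.length : Int) + 1 + 1) = (l.length : Int) + 2 by ring, pvTerm_succ]

lemma pvMain (n_blocks input_dim g : Int) (hg : g ≠ 0)
    (hne : ¬ (n_blocks = -1 ∧ g ≠ 0)) :
    get_noise_condn_nn_in_dims_py n_blocks input_dim g
      = get_noise_condn_nn_in_dims_py_alt n_blocks input_dim g := by
  simp only [get_noise_condn_nn_in_dims_py, get_noise_condn_nn_in_dims_py_alt, if_neg hg]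
  rw [pvLoopA, PySem.List.pyRange_one 0 n_blocks]
  simp only [PySem.List.length_pyRange_one]
  by_cases hpos : 0 ≤ n_blocks
  · -- n_blocks = ↑n
    obtain ⟨n, rfl⟩ := Int.eq_ofNat_of_zero_le hpos
    rw [PySem.List.slice_to_natCast]
    have hlen : ((n : Int) - 2 - 0).toNat = n - 2 := by omega
    have hn0 : ((n : Int) - 0).toNat = n := by omega
    rw [hlen, hn0, ← List.map_take, List.take_range]
    have hmin : min n (n - 2 + 2) = n := by omega
    rw [hmin]
    simp [List.map_map, Function.comp]
  · -- n_blocks ≤ -2 (n_blocks = -1 excluded)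
    have hn1 : n_blocks ≠ -1 := fun h => hne ⟨h, hg⟩
    obtain ⟨m, hm2, rfl⟩ : ∃ m : Nat, 2 ≤ m ∧ n_blocks = -(m : Int) :=
      ⟨(-n_blocks).toNat, by omega, by omega⟩
    rw [PySem.List.slice_to_neg_natCast _ _ (by omega)]
    have h2 : ((-(m : Int) - 2 - 0).toNat + 2) = 2 := by omega
    have h0 : (-(m : Int) - 0).toNat = 0 := by omega
    rw [h2, h0]
    simp [show (2 : Nat) - m = 0 by omega]

-- ===== VERDICT (by name: the statement is the Claim_ definition above) =====
theorem get_noise_condn_nn_in_dims_py_spec : Claim_unchanged_get_noise_condn_nn_in_dims_py := by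
  intro n_blocks input_dim g _ hnd
  by_cases hg : g = 0
  · subst hg
    simp [get_noise_condn_nn_in_dims_py, get_noise_condn_nn_in_dims_py_alt]
  · exact pvMain n_blocks input_dim g hg hnd

theorem get_noise_condn_nn_in_dims_py_changed : Claim_changed_get_noise_condn_nn_in_dims_py := by
  unfold Claim_changed_get_noise_condn_nn_in_dims_py; decide

theorem get_noise_condn_nn_in_dims_py_tight : Claim_exact_get_noise_condn_nn_in_dims_py := by
  intro n_blocks input_dim g _ hd
  obtain ⟨rfl, hg⟩ := hd
  simp only [get_noise_condn_nn_in_dims_py, get_noise_condn_nn_in_dims_py_alt, if_neg hg]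
  rw [pvLoopA]
  simp [PySem.List.slice_to_neg_one,
        List.range_succ, pvTerm]
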